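-- pv_equiv track=rewrite | github.com/Sam-Max/plugin.video.jacktook | resources/lib/utils.py | filter_by_quality
-- ===== SOURCE A (Python) =====
-- def filter_by_quality(results):
--     quality_720p = []
--     quality_1080p = []
--     quality_4k = []
--     no_quarlity = []
--
--     for res in results:
--         title = res["title"]
--         if "480p" in title:
--             res["qtTitle"] = "[B][COLOR orange]480p - [/COLOR][/B]" + res["title"]
--             res["Quality"] = "480p"
--             quality_720p.append(res)
--         elif "720p" in title:
--             res["qtTitle"] = "[B][COLOR orange]720p - [/COLOR][/B]" + res["title"]
--             res["Quality"] = "720p"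
--             quality_720p.append(res)
--         elif "1080p" in title:
--             res["qtTitle"] = "[B][COLOR blue]1080p - [/COLOR][/B]" + res["title"]
--             res["Quality"] = "1080p"
--             quality_1080p.append(res)
--         elif "2160" in title:
--             res["qtTitle"] = "[B][COLOR yellow]4k - [/COLOR][/B]" + res["title"]
--             res["Quality"] = "4k"
--             quality_4k.append(res)
--         else:
--             res["qtTitle"] = "[B][COLOR yellow]N/A - [/COLOR][/B]" + res["title"]
--             res["Quality"] = "N/A"
--             no_quarlity.append(res)
--
--     combined_list = quality_4k + quality_1080p + quality_720p + no_quarlity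
--     return combined_list
-- ===== SOURCE B (Python) =====
-- def filter_by_quality(results):
--     ranked = []
--     for res in results:
--         title = res["title"]
--         if "480p" in title:
--             quality, color, rank = "480p", "orange", 2
--         elif "720p" in title:
--             quality, color, rank = "720p", "orange", 2
--         elif "1080p" in title:
--             quality, color, rank = "1080p", "blue", 1
--         elif "2160" in title:
--             quality, color, rank = "4k", "yellow", 0
--         else:
--             quality, color, rank = "N/A", "yellow", 3
--         res["qtTitle"] = "[B][COLOR " + color + "]" + quality + " - [/COLOR][/B]" + res["title"]
--         res["Quality"] = quality
--         ranked.append((rank, res))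
--     return [res for _, res in sorted(ranked, key=lambda p: p[0])]
-- ===== Notes on version B (the rewrite author's own statement) =====
-- stated objective: alternative
-- what changed: Replaces the four-bucket partition-and-concatenate with a single pass that records a quality rank per item followed by one stable sort on that rank.
import Mathlib
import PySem

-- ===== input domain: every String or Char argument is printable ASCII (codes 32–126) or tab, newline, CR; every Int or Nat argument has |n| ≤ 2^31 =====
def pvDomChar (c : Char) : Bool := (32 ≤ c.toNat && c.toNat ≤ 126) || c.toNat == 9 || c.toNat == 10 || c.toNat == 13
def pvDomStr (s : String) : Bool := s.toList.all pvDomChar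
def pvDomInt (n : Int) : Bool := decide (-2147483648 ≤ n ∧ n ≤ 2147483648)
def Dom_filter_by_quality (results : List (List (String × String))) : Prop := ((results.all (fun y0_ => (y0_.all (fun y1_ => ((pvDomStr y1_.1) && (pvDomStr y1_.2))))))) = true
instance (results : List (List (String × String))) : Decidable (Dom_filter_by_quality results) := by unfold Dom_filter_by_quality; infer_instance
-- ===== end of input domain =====

-- B replaces A's four-bucket partition-and-concatenate by one tagging pass plus a single
-- stable sort on a quality rank (alternative decomposition, same final order; both Pythons
-- tag each result dict in place the same way — the theorems are about the return value).


-- ===== PORT A =====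
-- A's loop body: classify res into one of the four buckets (480p/720p, 1080p, 4k, N/A),
-- tagging it with "qtTitle"/"Quality" (dict assignment = PySem.Dict.insert).
def pvStepA (acc : List (List (String × String)) × List (List (String × String)) ×
                   List (List (String × String)) × List (List (String × String)))
            (res : List (String × String)) :
    List (List (String × String)) × List (List (String × String)) ×
    List (List (String × String)) × List (List (String × String)) :=
  let d := PySem.Dict.mk res
  let title := d.getD "title" ""
  if PySem.Str.isIn "480p" title then
    let d := d.insert "qtTitle" ("[B][COLOR orange]480p - [/COLOR][/B]" ++ d.getD "title" "")
    let d := d.insert "Quality" "480p"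
    (acc.1 ++ [d.items], acc.2.1, acc.2.2.1, acc.2.2.2)
  else if PySem.Str.isIn "720p" title then
    let d := d.insert "qtTitle" ("[B][COLOR orange]720p - [/COLOR][/B]" ++ d.getD "title" "")
    let d := d.insert "Quality" "720p"
    (acc.1 ++ [d.items], acc.2.1, acc.2.2.1, acc.2.2.2)
  else if PySem.Str.isIn "1080p" title then
    let d := d.insert "qtTitle" ("[B][COLOR blue]1080p - [/COLOR][/B]" ++ d.getD "title" "")
    let d := d.insert "Quality" "1080p"
    (acc.1, acc.2.1 ++ [d.items], acc.2.2.1, acc.2.2.2)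
  else if PySem.Str.isIn "2160" title then
    let d := d.insert "qtTitle" ("[B][COLOR yellow]4k - [/COLOR][/B]" ++ d.getD "title" "")
    let d := d.insert "Quality" "4k"
    (acc.1, acc.2.1, acc.2.2.1 ++ [d.items], acc.2.2.2)
  else
    let d := d.insert "qtTitle" ("[B][COLOR yellow]N/A - [/COLOR][/B]" ++ d.getD "title" "")
    let d := d.insert "Quality" "N/A"
    (acc.1, acc.2.1, acc.2.2.1, acc.2.2.2 ++ [d.items])

-- literal port of A: fill the four buckets, then return 4k ++ 1080p ++ 720p ++ no-quality
def filter_by_quality (results : List (List (String × String))) : List (List (String × String)) :=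
  let r := results.foldl pvStepA ([], [], [], [])
  r.2.2.1 ++ r.2.1 ++ r.1 ++ r.2.2.2

-- ===== PORT B =====
-- B's loop body: the same classification, producing (rank, tagged res)
def pvTag (res : List (String × String)) : Int × List (String × String) :=
  let d := PySem.Dict.mk res
  let title := d.getD "title" ""
  let qcr : String × String × Int :=
    if PySem.Str.isIn "480p" title then ("480p", "orange", 2)
    else if PySem.Str.isIn "720p" title then ("720p", "orange", 2)
    else if PySem.Str.isIn "1080p" title then ("1080p", "blue", 1)
    else if PySem.Str.isIn "2160" title then ("4k", "yellow", 0)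
    else ("N/A", "yellow", 3)
  let d := d.insert "qtTitle" ("[B][COLOR " ++ qcr.2.1 ++ "]" ++ qcr.1 ++ " - [/COLOR][/B]" ++ d.getD "title" "")
  let d := d.insert "Quality" qcr.1
  (qcr.2.2, d.items)

-- literal port of Source B: one tagging pass, one stable sort on the rank, drop the ranks
def filter_by_quality_alt (results : List (List (String × String))) : List (List (String × String)) :=
  (PySem.List.sorted (results.map pvTag) (fun p => p.1)).map (fun p => p.2)

-- ===== PRECONDITION & SPEC =====
-- Pre_ excludes exactly the inputs on which the Python A raises KeyError: a result dict
-- without a "title" key (B raises there too).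
def Pre_filter_by_quality (results : List (List (String × String))) : Prop :=
  (results.all (fun res => (PySem.Dict.mk res).contains "title")) = true
instance (results : List (List (String × String))) : Decidable (Pre_filter_by_quality results) := by unfold Pre_filter_by_quality; infer_instance
def pvWitness_filter_by_quality : (List (List (String × String))) :=
  [[("title", "Movie 720p"), ("seed", "3")], [("title", "Other 2160")]]
def Spec_filter_by_quality (results : List (List (String × String))) (out : List (List (String × String))) : Prop := out = filter_by_quality_alt results
instance (results : List (List (String × String))) (out : List (List (String × String))) : Decidable (Spec_filter_by_quality results out) := by unfold Spec_filter_by_quality; infer_instance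

-- ===== CLAIM (what is proved, stated in full; the proofs are below) =====
def Claim_equal_filter_by_quality : Prop := ∀ (results : List (List (String × String))), Dom_filter_by_quality results → Pre_filter_by_quality results → Spec_filter_by_quality results (filter_by_quality results)

-- ===== LEMMAS AND PROOFS =====

-- the elements of rank r, tagged, in input order
def pvBlock (results : List (List (String × String))) (r : Int) : List (List (String × String)) :=
  ((results.map pvTag).filter (fun p => p.1 == r)).map (fun p => p.2)

-- A's step, reformulated on the tag of the element
def pvStep2 (acc : List (List (String × String)) × List (List (String × String)) ×
                   List (List (String × String)) × List (List (String × String)))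
            (p : Int × List (String × String)) :
    List (List (String × String)) × List (List (String × String)) ×
    List (List (String × String)) × List (List (String × String)) :=
  (if p.1 == 2 then acc.1 ++ [p.2] else acc.1,
   if p.1 == 1 then acc.2.1 ++ [p.2] else acc.2.1,
   if p.1 == 0 then acc.2.2.1 ++ [p.2] else acc.2.2.1,
   if p.1 == 3 then acc.2.2.2 ++ [p.2] else acc.2.2.2)

theorem pvStepA_eq (acc : List (List (String × String)) × List (List (String × String)) ×
                   List (List (String × String)) × List (List (String × String)))
    (res : List (String × String)) : pvStepA acc res = pvStep2 acc (pvTag res) := by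
  unfold pvStepA pvTag pvStep2
  dsimp only
  split_ifs <;> first | rfl | simp_all

theorem pvTag_rank (res : List (String × String)) :
    (pvTag res).1 = 0 ∨ (pvTag res).1 = 1 ∨ (pvTag res).1 = 2 ∨ (pvTag res).1 = 3 := by
  unfold pvTag
  dsimp only
  split_ifs <;> simp

theorem pvBlock_cons (res : List (String × String)) (t : List (List (String × String))) (r : Int) :
    pvBlock (res :: t) r
      = (if (pvTag res).1 == r then [(pvTag res).2] else []) ++ pvBlock t r := by
  unfold pvBlock
  simp only [List.map_cons, List.filter_cons]
  split_ifs <;> simp_all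

-- insertBy passes over a prefix it does not go before …
theorem pvInsertBy_append {α : Type} (before : α → α → Bool) (x : α) (a b : List α)
    (h : ∀ y ∈ a, before x y = false) :
    PySem.List.insertBy before x (a ++ b) = a ++ PySem.List.insertBy before x b := by
  induction a with
  | nil => simp
  | cons y ys ih =>
      have hy : before x y = false := h y (by simp)
      simp only [List.cons_append, PySem.List.insertBy, hy, Bool.false_eq_true, if_false]
      rw [ih (fun z hz => h z (by simp [hz]))]

-- … and stops in front of a suffix it goes before
theorem pvInsertBy_cons_of_before {α : Type} (before : α → α → Bool) (x : α) (b : List α)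
    (h : ∀ y ∈ b, before x y = true) :
    PySem.List.insertBy before x b = x :: b := by
  cases b with
  | nil => simp [PySem.List.insertBy]
  | cons z zs => simp [PySem.List.insertBy, h z (by simp)]

-- the stable-sort fold keeps the four rank blocks, appending each new element to its block
theorem pvFoldl_ins_blocks (xs : List (Int × List (String × String)))
    (hx : ∀ p ∈ xs, p.1 = 0 ∨ p.1 = 1 ∨ p.1 = 2 ∨ p.1 = 3) :
    ∀ (f0 f1 f2 f3 : List (Int × List (String × String))),
      (∀ p ∈ f0, p.1 = 0) → (∀ p ∈ f1, p.1 = 1) → (∀ p ∈ f2, p.1 = 2) → (∀ p ∈ f3, p.1 = 3) →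
      xs.foldl (fun acc x => PySem.List.insertBy (fun a b => decide (a.1 < b.1)) x acc)
        (f0 ++ f1 ++ f2 ++ f3)
      = (f0 ++ xs.filter (fun p => p.1 == 0)) ++ (f1 ++ xs.filter (fun p => p.1 == 1))
        ++ (f2 ++ xs.filter (fun p => p.1 == 2)) ++ (f3 ++ xs.filter (fun p => p.1 == 3)) := by
  induction xs with
  | nil => intro f0 f1 f2 f3 _ _ _ _; simp
  | cons x t ih =>
      intro f0 f1 f2 f3 h0 h1 h2 h3
      have hxt : ∀ p ∈ t, p.1 = 0 ∨ p.1 = 1 ∨ p.1 = 2 ∨ p.1 = 3 :=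
        fun p hp => hx p (by simp [hp])
      simp only [List.foldl_cons]
      rcases hx x (by simp) with hr | hr | hr | hr
      · -- rank 0: after f0, before everything else
        have e : PySem.List.insertBy (fun a b => decide (a.1 < b.1)) x (f0 ++ f1 ++ f2 ++ f3)
            = f0 ++ (x :: (f1 ++ f2 ++ f3)) := by
          rw [show f0 ++ f1 ++ f2 ++ f3 = f0 ++ (f1 ++ f2 ++ f3) by simp,
              pvInsertBy_append _ _ f0 _ (fun y hy => by simp [hr, h0 y hy]),
              pvInsertBy_cons_of_before _ _ _
                (fun y hy => by
                  rcases List.mem_append.1 hy with hy' | hy'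
                  · rcases List.mem_append.1 hy' with hy'' | hy''
                    · simp [hr, h1 y hy'']
                    · simp [hr, h2 y hy'']
                  · simp [hr, h3 y hy'])]
        rw [e, show f0 ++ (x :: (f1 ++ f2 ++ f3)) = (f0 ++ [x]) ++ f1 ++ f2 ++ f3 by simp,
            ih hxt (f0 ++ [x]) f1 f2 f3
              (fun p hp => by
                rcases List.mem_append.1 hp with hp' | hp'
                · exact h0 p hp'
                · simp only [List.mem_singleton] at hp'; simp [hp', hr])
              h1 h2 h3]
        simp [hr]
      · -- rank 1: after f0 ++ f1, before f2 ++ f3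
        have e : PySem.List.insertBy (fun a b => decide (a.1 < b.1)) x (f0 ++ f1 ++ f2 ++ f3)
            = (f0 ++ f1) ++ (x :: (f2 ++ f3)) := by
          rw [show f0 ++ f1 ++ f2 ++ f3 = (f0 ++ f1) ++ (f2 ++ f3) by simp,
              pvInsertBy_append _ _ (f0 ++ f1) _
                (fun y hy => by
                  rcases List.mem_append.1 hy with hy' | hy'
                  · simp [hr, h0 y hy']
                  · simp [hr, h1 y hy']),
              pvInsertBy_cons_of_before _ _ _
                (fun y hy => by
                  rcases List.mem_append.1 hy with hy' | hy'
                  · simp [hr, h2 y hy']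
                  · simp [hr, h3 y hy'])]
        rw [e, show (f0 ++ f1) ++ (x :: (f2 ++ f3)) = f0 ++ (f1 ++ [x]) ++ f2 ++ f3 by simp,
            ih hxt f0 (f1 ++ [x]) f2 f3 h0
              (fun p hp => by
                rcases List.mem_append.1 hp with hp' | hp'
                · exact h1 p hp'
                · simp only [List.mem_singleton] at hp'; simp [hp', hr])
              h2 h3]
        simp [hr]
      · -- rank 2: after f0 ++ f1 ++ f2, before f3
        have e : PySem.List.insertBy (fun a b => decide (a.1 < b.1)) x (f0 ++ f1 ++ f2 ++ f3)
            = (f0 ++ f1 ++ f2) ++ (x :: f3) := by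
          rw [pvInsertBy_append _ _ (f0 ++ f1 ++ f2) _
                (fun y hy => by
                  rcases List.mem_append.1 hy with hy' | hy'
                  · rcases List.mem_append.1 hy' with hy'' | hy''
                    · simp [hr, h0 y hy'']
                    · simp [hr, h1 y hy'']
                  · simp [hr, h2 y hy']),
              pvInsertBy_cons_of_before _ _ _ (fun y hy => by simp [hr, h3 y hy])]
        rw [e, show (f0 ++ f1 ++ f2) ++ (x :: f3) = f0 ++ f1 ++ (f2 ++ [x]) ++ f3 by simp,
            ih hxt f0 f1 (f2 ++ [x]) f3 h0 h1
              (fun p hp => by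
                rcases List.mem_append.1 hp with hp' | hp'
                · exact h2 p hp'
                · simp only [List.mem_singleton] at hp'; simp [hp', hr])
              h3]
        simp [hr]
      · -- rank 3: after everything
        have e : PySem.List.insertBy (fun a b => decide (a.1 < b.1)) x (f0 ++ f1 ++ f2 ++ f3)
            = f0 ++ f1 ++ f2 ++ f3 ++ [x] := by
          rw [PySem.List.insertBy_of_forall_not_before _ _ _
                (fun y hy => by
                  rcases List.mem_append.1 hy with hy' | hy'
                  · rcases List.mem_append.1 hy' with hy'' | hy''
                    · rcases List.mem_append.1 hy'' with hy''' | hy'''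
                      · simp [hr, h0 y hy''']
                      · simp [hr, h1 y hy''']
                    · simp [hr, h2 y hy'']
                  · simp [hr, h3 y hy'])]
        rw [e, show f0 ++ f1 ++ f2 ++ f3 ++ [x] = f0 ++ f1 ++ f2 ++ (f3 ++ [x]) by simp,
            ih hxt f0 f1 f2 (f3 ++ [x]) h0 h1 h2
              (fun p hp => by
                rcases List.mem_append.1 hp with hp' | hp'
                · exact h3 p hp'
                · simp only [List.mem_singleton] at hp'; simp [hp', hr])]
        simp [hr]

-- B's result is the concatenation of the four rank blocks
theorem pvAlt_blocks (results : List (List (String × String))) :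
    filter_by_quality_alt results
      = pvBlock results 0 ++ pvBlock results 1 ++ pvBlock results 2 ++ pvBlock results 3 := by
  unfold filter_by_quality_alt pvBlock
  rw [PySem.List.sorted_eq_foldl_insertBy]
  have h := pvFoldl_ins_blocks (results.map pvTag)
      (fun p hp => by
        rcases List.mem_map.1 hp with ⟨res, _, rfl⟩
        exact pvTag_rank res)
      [] [] [] [] (by simp) (by simp) (by simp) (by simp)
  simp only [List.nil_append, List.append_nil] at h
  rw [h]
  simp

-- A's fold keeps its four buckets equal to the rank blocks of the processed prefix
theorem pvA_fold (rs : List (List (String × String))) :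
    ∀ (t0 t1 t2 t3 : List (List (String × String))),
      rs.foldl pvStepA (t0, t1, t2, t3)
      = (t0 ++ pvBlock rs 2, t1 ++ pvBlock rs 1, t2 ++ pvBlock rs 0, t3 ++ pvBlock rs 3) := by
  induction rs with
  | nil => intro t0 t1 t2 t3; simp [pvBlock]
  | cons res t ih =>
      intro t0 t1 t2 t3
      simp only [List.foldl_cons, pvStepA_eq]
      rcases pvTag_rank res with hr | hr | hr | hr
      · rw [show pvStep2 (t0, t1, t2, t3) (pvTag res) = (t0, t1, t2 ++ [(pvTag res).2], t3) by
              simp [pvStep2, hr], ih]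
        simp [pvBlock_cons, hr]
      · rw [show pvStep2 (t0, t1, t2, t3) (pvTag res) = (t0, t1 ++ [(pvTag res).2], t2, t3) by
              simp [pvStep2, hr], ih]
        simp [pvBlock_cons, hr]
      · rw [show pvStep2 (t0, t1, t2, t3) (pvTag res) = (t0 ++ [(pvTag res).2], t1, t2, t3) by
              simp [pvStep2, hr], ih]
        simp [pvBlock_cons, hr]
      · rw [show pvStep2 (t0, t1, t2, t3) (pvTag res) = (t0, t1, t2, t3 ++ [(pvTag res).2]) by
              simp [pvStep2, hr], ih]
        simp [pvBlock_cons, hr]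

theorem pvA_blocks (results : List (List (String × String))) :
    filter_by_quality results
      = pvBlock results 0 ++ pvBlock results 1 ++ pvBlock results 2 ++ pvBlock results 3 := by
  unfold filter_by_quality
  rw [show (([], [], [], []) : List (List (String × String)) × List (List (String × String)) ×
        List (List (String × String)) × List (List (String × String)))
      = (([] : List (List (String × String))), ([] : List (List (String × String))),
         ([] : List (List (String × String))), ([] : List (List (String × String)))) from rfl,
      pvA_fold]
  simp

-- ===== VERDICT (by name: the statement is the Claim_ definition above) =====
theorem filter_by_quality_spec : Claim_equal_filter_by_quality := by
  intro results _ _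
  unfold Spec_filter_by_quality
  rw [pvA_blocks, pvAlt_blocks]
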